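-- pv_equiv track=rewrite | github.com/CanisW/poltype2 | PoltypeModules/forcebalancepoltypeinterface.py | GenerateQMFolderToCSVIndex
-- ===== SOURCE A (Python) =====
-- def GenerateQMFolderToCSVIndex(qmfolderlist):
--     qmfoldertoindex={}
--     prefixtoarray={}
--     for i in range(len(qmfolderlist)):
--         folder=qmfolderlist[i]
--         foldersplit=folder.split('_')
--         folderprefix='_'.join(foldersplit[:-1])
--         if folderprefix not in prefixtoarray.keys():
--             prefixtoarray[folderprefix]=[]
--         prefixtoarray[folderprefix].append(folder)
--     index=0
--     for prefix,array in prefixtoarray.items():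
--         for folder in array:
--             qmfoldertoindex[folder]=index
--         index+=1
--     return qmfoldertoindex
-- ===== SOURCE B (Python) =====
-- def GenerateQMFolderToCSVIndex(qmfolderlist):
--     # first-appearance-ordered list of distinct prefixes, plus each folder's prefix
--     prefixes = []
--     prefixof = []
--     for folder in qmfolderlist:
--         p = '_'.join(folder.split('_')[:-1])
--         if p not in prefixes:
--             prefixes.append(p)
--         prefixof.append(p)
--     qmfoldertoindex = {}
--     for idx, p in enumerate(prefixes):
--         for folder, q in zip(qmfolderlist, prefixof):
--             if q == p:
--                 qmfoldertoindex[folder] = idx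
--     return qmfoldertoindex
-- ===== Notes on version B (the rewrite author's own statement) =====
-- stated objective: alternative
-- what changed: B drops A's prefix->folder-array grouping dict entirely: it keeps an ordered list of distinct prefixes plus a parallel list of each folder's prefix, then emits indices by scanning the folder/prefix pairs once per distinct prefix, instead of building and then flattening per-prefix arrays.
import Mathlib
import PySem

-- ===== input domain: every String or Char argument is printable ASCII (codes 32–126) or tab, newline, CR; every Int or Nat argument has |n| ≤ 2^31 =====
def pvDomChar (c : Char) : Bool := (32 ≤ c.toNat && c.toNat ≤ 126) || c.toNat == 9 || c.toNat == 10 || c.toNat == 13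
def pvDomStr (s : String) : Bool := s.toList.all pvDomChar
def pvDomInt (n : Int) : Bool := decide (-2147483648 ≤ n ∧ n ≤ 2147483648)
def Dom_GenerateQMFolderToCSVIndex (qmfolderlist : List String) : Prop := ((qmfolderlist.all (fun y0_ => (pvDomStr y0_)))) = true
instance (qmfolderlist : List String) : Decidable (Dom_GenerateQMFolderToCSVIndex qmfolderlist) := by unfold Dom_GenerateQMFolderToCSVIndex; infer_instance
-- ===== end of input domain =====

-- B replaces A's prefix->folder-array grouping dict by an ordered list of distinct prefixes and a
-- per-prefix rescan of the folder/prefix pairs (objective: alternative decomposition, same results).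

-- shared helper: '_'.join(folder.split('_')[:-1]) — identical expression in both Python sources
-- (split sep is the literal "_" ≠ "", so Str.split? is always `some`; `.getD []` is exact here)
def folderPrefix (folder : String) : String :=
  PySem.Str.join "_" (PySem.List.slice ((PySem.Str.split? folder "_").getD []) none (some (-1)))

-- ===== PORT A =====
def GenerateQMFolderToCSVIndex (qmfolderlist : List String) : List (String × Int) :=
  let prefixtoarray : PySem.Dict String (List String) :=
    (PySem.List.pyRange 0 (PySem.List.len qmfolderlist)).foldl
      (fun (d : PySem.Dict String (List String)) i =>
        let folder := PySem.List.pyGetD qmfolderlist i ""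
        let folderprefix := folderPrefix folder
        let d := if d.contains folderprefix then d else d.insert folderprefix ([] : List String)
        -- prefixtoarray[folderprefix].append(folder): key is present, so this is d[k] = d.get(k,[]) + [folder]
        d.modify folderprefix [] (fun a => a ++ [folder]))
      PySem.Dict.empty
  (prefixtoarray.items.foldl
    (fun (st : PySem.Dict String Int × Int) pa =>
      (pa.2.foldl (fun o folder => o.insert folder st.2) st.1, st.2 + 1))
    (PySem.Dict.empty, 0)).1.items

-- ===== PORT B =====
def GenerateQMFolderToCSVIndex_alt (qmfolderlist : List String) : List (String × Int) :=
  let st : List String × List String :=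
    qmfolderlist.foldl
      (fun (st : List String × List String) folder =>
        let p := folderPrefix folder
        ((if st.1.contains p then st.1 else st.1 ++ [p]), st.2 ++ [p]))
      ([], [])
  ((PySem.List.enumerate st.1 0).foldl
    (fun (out : PySem.Dict String Int) ip =>
      (qmfolderlist.zip st.2).foldl
        (fun out fq => if fq.2 == ip.2 then out.insert fq.1 ip.1 else out) out)
    PySem.Dict.empty).items

-- ===== PRECONDITION & SPEC =====
def Spec_GenerateQMFolderToCSVIndex (qmfolderlist : List String) (out : List (String × Int)) : Prop := out = GenerateQMFolderToCSVIndex_alt qmfolderlist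
instance (qmfolderlist : List String) (out : List (String × Int)) : Decidable (Spec_GenerateQMFolderToCSVIndex qmfolderlist out) := by unfold Spec_GenerateQMFolderToCSVIndex; infer_instance

-- ===== CLAIM (what is proved, stated in full; the proofs are below) =====
def Claim_equal_GenerateQMFolderToCSVIndex : Prop := ∀ (qmfolderlist : List String), Dom_GenerateQMFolderToCSVIndex qmfolderlist → Spec_GenerateQMFolderToCSVIndex qmfolderlist (GenerateQMFolderToCSVIndex qmfolderlist)

-- ===== LEMMAS AND PROOFS =====

-- A's guarded insert-then-append step is extensionally a single `modify`
theorem stepA_eq_modify (d : PySem.Dict String (List String)) (p folder : String) :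
    ((if d.contains p then d else d.insert p ([] : List String)).modify p [] (fun a => a ++ [folder]))
      = d.modify p [] (fun a => a ++ [folder]) := by
  by_cases h : d.contains p
  · simp [h]
  · simp only [Bool.not_eq_true] at h
    simp [h, PySem.Dict.modify, PySem.Dict.getD_insert_self,
      PySem.Dict.insert_insert_self, PySem.Dict.getD_of_not_contains d _ h]

-- the common second phase: A's fold over (prefix, group) pairs with a running counter equals
-- B's fold over enumerated prefixes with a filtered rescan
theorem second_phase_eq (pfx : String → String) (l : List String) :
    ∀ (K : List String) (o : PySem.Dict String Int) (s : Int),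
    ((K.map (fun p => (p, l.filter (fun f => pfx f == p)))).foldl
        (fun (st : PySem.Dict String Int × Int) pa =>
          (pa.2.foldl (fun o folder => o.insert folder st.2) st.1, st.2 + 1)) (o, s)).1
      = (PySem.List.enumerate K s).foldl
          (fun o ip => l.foldl (fun o f => if pfx f == ip.2 then o.insert f ip.1 else o) o) o := by
  intro K
  induction K with
  | nil => intro o s; simp [PySem.List.enumerate_nil]
  | cons p K ih =>
      intro o s
      simp only [List.map_cons, List.foldl_cons, PySem.List.enumerate_cons]
      rw [← ih, List.foldl_filter]

theorem GenerateQMFolderToCSVIndex_eq_core (l : List String) :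
    GenerateQMFolderToCSVIndex l = GenerateQMFolderToCSVIndex_alt l := by
  unfold GenerateQMFolderToCSVIndex GenerateQMFolderToCSVIndex_alt
  dsimp only
  -- A's first loop is a fold over the list itself, and its guarded step is a `modify` step
  rw [PySem.List.foldl_pyRange_pyGetD l ""
    (fun d folder => ((if d.contains (folderPrefix folder) then d
        else d.insert (folderPrefix folder) ([] : List String)).modify
      (folderPrefix folder) [] (fun a => a ++ [folder])))
    PySem.Dict.empty (le_refl (0:Int))]
  simp only [Int.toNat_zero, List.drop_zero]
  rw [List.foldl_ext _ (fun d folder => d.modify (folderPrefix folder) [] (fun a => a ++ [folder]))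
    PySem.Dict.empty (fun d f _ => stepA_eq_modify d (folderPrefix f) f)]
  -- its items are the first-appearance-ordered distinct prefixes paired with their filtered groups
  have hnd : (l.foldl (fun d folder => d.modify (folderPrefix folder) [] (fun a => a ++ [folder]))
      PySem.Dict.empty).keys.Nodup :=
    PySem.Dict.nodup_keys_foldl_modify_key l folderPrefix [] (fun _ folder a => a ++ [folder])
      PySem.Dict.empty (by simp)
  have hkeys : (l.foldl (fun d folder => d.modify (folderPrefix folder) [] (fun a => a ++ [folder]))
      PySem.Dict.empty).keys = PySem.Set.ofList (l.map folderPrefix) := by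
    rw [PySem.Dict.keys_foldl_modify_key l folderPrefix [] (fun _ folder a => a ++ [folder])]
    simp [PySem.Set.update_nil_left]
  have hgetD : ∀ c, (l.foldl (fun d folder => d.modify (folderPrefix folder) [] (fun a => a ++ [folder]))
      PySem.Dict.empty).getD c [] = l.filter (fun f => folderPrefix f == c) := by
    intro c
    rw [show (l.foldl (fun d folder => d.modify (folderPrefix folder) [] (fun a => a ++ [folder]))
        PySem.Dict.empty)
      = ((l.map (fun f => (folderPrefix f, f))).foldl
          (fun d p => d.modify p.1 [] (fun a => a ++ [p.2])) PySem.Dict.empty) from by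
        rw [List.foldl_map]]
    rw [PySem.Dict.getD_foldl_modify_append]
    simp [List.filter_map, Function.comp_def]
  rw [PySem.Dict.items_eq_map_keys _ hnd []]
  simp only [hkeys]
  have hitems : (PySem.Set.ofList (l.map folderPrefix)).map
      (fun k => (k, (l.foldl (fun d folder => d.modify (folderPrefix folder) [] (fun a => a ++ [folder]))
        PySem.Dict.empty).getD k []))
    = (PySem.Set.ofList (l.map folderPrefix)).map (fun p => (p, l.filter (fun f => folderPrefix f == p))) := by
    exact List.map_congr_left (fun k _ => by rw [hgetD])
  rw [hitems, second_phase_eq folderPrefix l]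
  -- B's first loop: split the pair fold; its components are Set.ofList and map of the prefixes
  rw [show (fun (st : List String × List String) folder =>
      ((if st.1.contains (folderPrefix folder) then st.1 else st.1 ++ [folderPrefix folder]),
        st.2 ++ [folderPrefix folder]))
    = (fun (st : List String × List String) folder =>
      (PySem.Set.add st.1 (folderPrefix folder), st.2 ++ [folderPrefix folder])) from rfl]
  rw [PySem.List.foldl_prod_mk (fun s e => PySem.Set.add s (folderPrefix e))
      (fun b e => b ++ [folderPrefix e]) l [] []]
  rw [← PySem.Set.update_map_eq_foldl_add l folderPrefix [], PySem.Set.update_nil_left]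
  rw [PySem.List.foldl_append_singleton_eq_map folderPrefix l []]
  -- B's inner zipped rescan is the filtered rescan
  have hzip : l.zip (l.map folderPrefix) = l.map (fun f => (f, folderPrefix f)) :=
    List.map_prod_left_eq_zip.symm
  simp only [List.nil_append, hzip, List.foldl_map]

-- ===== VERDICT (by name: the statement is the Claim_ definition above) =====
theorem GenerateQMFolderToCSVIndex_spec : Claim_equal_GenerateQMFolderToCSVIndex := by
  intro l _
  unfold Spec_GenerateQMFolderToCSVIndex
  exact GenerateQMFolderToCSVIndex_eq_core l
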